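-- pv_equiv track=rewrite | github.com/moguonyanko/algorithmer | python/algorithm.py | bestInvitation
-- ===== SOURCE A (Python) =====
-- def bestInvitation(first, second):
-- 	dic = {}
-- 	rng = range(len(first))
--
-- 	for i in rng:
-- 		dic[first[i]] = 0
-- 		dic[second[i]] = 0
--
-- 	for i in rng:
-- 		dic[first[i]] = dic[first[i]]+1
-- 		dic[second[i]] = dic[second[i]]+1
--
-- 	ans = 0
-- 	for key in dic:
-- 		if ans < dic[key]: ans = dic[key]
--
-- 	return ans
-- ===== SOURCE B (Python) =====
-- def bestInvitation(first, second):
--     vals = []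
--     for i in range(len(first)):
--         vals.append(first[i])
--         vals.append(second[i])
--     vals.sort()
--     best = 0
--     run = 0
--     prev = None
--     for v in vals:
--         if prev is not None and v == prev:
--             run += 1
--         else:
--             run = 1
--         if run > best:
--             best = run
--         prev = v
--     return best
-- ===== Notes on version B (the rewrite author's own statement) =====
-- stated objective: alternative
-- what changed: Replaces A's three dict passes (zero-init, count, max-scan) by flattening the paired values into one list, sorting it, and taking the longest run of equal adjacent values in a single scan.
import Mathlib
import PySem

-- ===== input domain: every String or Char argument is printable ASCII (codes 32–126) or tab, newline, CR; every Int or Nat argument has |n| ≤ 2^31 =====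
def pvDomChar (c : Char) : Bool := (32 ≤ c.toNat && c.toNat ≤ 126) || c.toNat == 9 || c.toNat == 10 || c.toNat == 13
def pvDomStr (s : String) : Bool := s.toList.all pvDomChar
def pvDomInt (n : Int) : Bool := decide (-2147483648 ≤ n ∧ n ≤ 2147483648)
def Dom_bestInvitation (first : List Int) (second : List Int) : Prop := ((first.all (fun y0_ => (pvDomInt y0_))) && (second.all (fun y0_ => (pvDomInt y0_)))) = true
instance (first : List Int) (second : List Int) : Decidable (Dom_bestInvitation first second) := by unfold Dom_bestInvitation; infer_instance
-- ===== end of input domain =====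

-- B replaces A's three dict passes by flatten + sort + longest-equal-run scan (alternative algorithm, not claimed faster).

-- ===== PORT A =====
-- Literal port of A. Indexing uses pyGetD with default 0: under Pre_ every index is in
-- range, so the default is never used; dic[k] lookups use getD 0, exact because the first
-- loop put every looked-up key into the dict.
def bestInvitation (first : List Int) (second : List Int) : Int :=
  let rng := PySem.List.pyRange 0 (first.length : Int) 1
  let dic : PySem.Dict Int Int := rng.foldl (fun dic i =>
      (dic.insert (PySem.List.pyGetD first i 0) 0).insert (PySem.List.pyGetD second i 0) 0)
    PySem.Dict.empty
  let dic := rng.foldl (fun dic i =>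
      let dic := dic.insert (PySem.List.pyGetD first i 0)
                    (dic.getD (PySem.List.pyGetD first i 0) 0 + 1)
      dic.insert (PySem.List.pyGetD second i 0)
                    (dic.getD (PySem.List.pyGetD second i 0) 0 + 1))
    dic
  dic.keys.foldl (fun ans key => if ans < dic.getD key 0 then dic.getD key 0 else ans) 0

-- ===== PORT B =====
-- Literal port of Source B (same pyGetD convention for indexing as above).
def bestInvitation_alt (first : List Int) (second : List Int) : Int :=
  let vals := (PySem.List.pyRange 0 (first.length : Int) 1).foldl
      (fun vals i => (vals ++ [PySem.List.pyGetD first i 0]) ++ [PySem.List.pyGetD second i 0]) []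
  let vals := PySem.List.sorted vals (fun x => x) false
  let st := vals.foldl (fun st v =>
      let run : Int := if st.2.2 = some v then st.2.1 + 1 else 1
      (if run > st.1 then run else st.1, run, some v))
    ((0 : Int), (0 : Int), (none : Option Int))
  st.1

-- ===== PRECONDITION & SPEC =====
-- Pre_ excludes exactly the inputs where A raises IndexError (second shorter than first);
-- B raises there too.
def Pre_bestInvitation (first : List Int) (second : List Int) : Prop :=
  first.length ≤ second.length
instance (first : List Int) (second : List Int) : Decidable (Pre_bestInvitation first second) := by
  unfold Pre_bestInvitation; infer_instance

def pvWitness_bestInvitation : List Int × List Int := ([1, 2, 1], [2, 3, 1])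

def Spec_bestInvitation (first : List Int) (second : List Int) (out : Int) : Prop := out = bestInvitation_alt first second
instance (first : List Int) (second : List Int) (out : Int) : Decidable (Spec_bestInvitation first second out) := by unfold Spec_bestInvitation; infer_instance

-- ===== CLAIM (what is proved, stated in full; the proofs are below) =====
def Claim_equal_bestInvitation : Prop := ∀ (first : List Int) (second : List Int), Dom_bestInvitation first second → Pre_bestInvitation first second → Spec_bestInvitation first second (bestInvitation first second)

-- ===== LEMMAS AND PROOFS =====

-- The flattened value list both programs work over.
def pvL (first second : List Int) : List Int :=
  (PySem.List.pyRange 0 (first.length : Int) 1).flatMap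
    (fun i => [PySem.List.pyGetD first i 0, PySem.List.pyGetD second i 0])

-- maximum multiplicity, as a fold of max over the counts of all occurrences
def pvMx (P : List Int) : Int := (P.map (fun v => (P.count v : Int))).foldl max 0

def pvStep : (Int × Int × Option Int) → Int → (Int × Int × Option Int) := fun st v =>
  let run : Int := if st.2.2 = some v then st.2.1 + 1 else 1
  (if run > st.1 then run else st.1, run, some v)

lemma pvStep_eq (best run : Int) (prev : Option Int) (v : Int) :
    pvStep (best, run, prev) v =
      (if (if prev = some v then run + 1 else 1) > best
         then (if prev = some v then run + 1 else 1) else best,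
       (if prev = some v then run + 1 else 1), some v) := rfl

-- a fold over pairs flattened with flatMap is the two-step fold over the index list
lemma pv_foldl_pair {α : Type} (rng : List Int) (f s : Int → Int) (g : α → Int → α) (init : α) :
    (rng.flatMap (fun i => [f i, s i])).foldl g init
      = rng.foldl (fun acc i => g (g acc (f i)) (s i)) init := by
  rw [List.foldl_flatMap]
  rfl

-- A's final dict (first loop zero-initialises, second loop counts), over abstract rng/f/s
def pvD1 (rng : List Int) (f s : Int → Int) : PySem.Dict Int Int :=
  rng.foldl (fun dic i =>
      (dic.insert (f i) (dic.getD (f i) 0 + 1)).insert (s i)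
        ((dic.insert (f i) (dic.getD (f i) 0 + 1)).getD (s i) 0 + 1))
    (rng.foldl (fun dic i => (dic.insert (f i) 0).insert (s i) 0) PySem.Dict.empty)

lemma pv_foldl_max_eq (xs ys : List Int) (h : ∀ v, v ∈ xs ↔ v ∈ ys) :
    xs.foldl max 0 = ys.foldl max 0 := by
  apply le_antisymm
  · rcases PySem.List.foldl_max_mem xs 0 with h0 | hm
    · rw [h0]; exact (PySem.List.le_foldl_max ys 0).1
    · exact (PySem.List.le_foldl_max ys 0).2 _ ((h _).mp hm)
  · rcases PySem.List.foldl_max_mem ys 0 with h0 | hm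
    · rw [h0]; exact (PySem.List.le_foldl_max xs 0).1
    · exact (PySem.List.le_foldl_max xs 0).2 _ ((h _).mpr hm)

lemma pvMx_nonneg (P : List Int) : 0 ≤ pvMx P :=
  (PySem.List.le_foldl_max (P.map (fun v => (P.count v : Int))) 0).1

lemma pv_count_le_mx (P : List Int) (v : Int) (hv : v ∈ P) : (P.count v : Int) ≤ pvMx P :=
  (PySem.List.le_foldl_max _ 0).2 _ (List.mem_map_of_mem hv)

lemma pvMx_append (P : List Int) (x : Int) :
    pvMx (P ++ [x]) = max (pvMx P) (((P ++ [x]).count x : Int)) := by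
  apply le_antisymm
  · rcases PySem.List.foldl_max_mem ((P ++ [x]).map (fun v => ((P ++ [x]).count v : Int))) 0 with h0 | hm
    · unfold pvMx; rw [h0]
      exact le_max_of_le_left (pvMx_nonneg P)
    · rcases List.mem_map.mp hm with ⟨v, hv, hveq⟩
      unfold pvMx; rw [← hveq]
      by_cases hvx : v = x
      · subst hvx; exact le_max_right _ _
      · have hvP : v ∈ P := by
          rcases List.mem_append.mp hv with h | h
          · exact h
          · simp at h; exact absurd h hvx
        have : (P ++ [x]).count v = P.count v := by
          simp [List.count_append, List.count_singleton]
          omega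
        rw [this]
        exact le_max_of_le_left (pv_count_le_mx P v hvP)
  · apply max_le
    · rcases PySem.List.foldl_max_mem (P.map (fun v => (P.count v : Int))) 0 with h0 | hm
      · unfold pvMx; rw [h0]; exact pvMx_nonneg _
      · rcases List.mem_map.mp hm with ⟨v, hv, hveq⟩
        unfold pvMx; rw [← hveq]
        calc (P.count v : Int) ≤ ((P ++ [x]).count v : Int) := by
              simp [List.count_append]
          _ ≤ pvMx (P ++ [x]) := pv_count_le_mx _ v (List.mem_append_left _ hv)
    · exact pv_count_le_mx _ x (by simp)

-- A sorted list's scan state after any nonempty prefix: best = max multiplicity so far,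
-- run = multiplicity of the last element, prev = the last element.
lemma pv_scan_sorted (T : List Int) (x : Int) (hs : ((T ++ [x]) : List Int).Pairwise (· ≤ ·)) :
    (T ++ [x]).foldl pvStep (0, 0, none) = (pvMx (T ++ [x]), (((T ++ [x]).count x : Int)), some x) := by
  induction T using List.reverseRecOn generalizing x with
  | nil =>
    simp [pvStep, pvMx]
  | append_singleton T y ih =>
    have hsub : (T ++ [y]).Pairwise (· ≤ ·) :=
      hs.sublist (List.sublist_append_left _ _)
    have hx_ge : ∀ v ∈ T ++ [y], v ≤ x := by
      intro v hv
      exact (List.pairwise_append.mp hs).2.2 v hv x (by simp)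
    rw [List.foldl_append, ih y hsub]
    by_cases hxy : y = x
    · subst hxy
      have hcnt : ((T ++ [y]) ++ [y]).count y = (T ++ [y]).count y + 1 := by
        rw [List.count_append]
        have h3 : List.count y [y] = 1 := List.count_singleton_self
        omega
      rw [List.foldl_cons, List.foldl_nil, pvStep_eq, if_pos rfl]
      conv_rhs => rw [pvMx_append, hcnt]
      push_cast
      have hb : (if (List.count y (T ++ [y]) : Int) + 1 > pvMx (T ++ [y])
            then (List.count y (T ++ [y]) : Int) + 1 else pvMx (T ++ [y]))
          = max (pvMx (T ++ [y])) ((List.count y (T ++ [y]) : Int) + 1) := by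
        rcases le_or_gt ((List.count y (T ++ [y]) : Int) + 1) (pvMx (T ++ [y])) with h | h
        · rw [if_neg (by omega), max_eq_left (by omega)]
        · rw [if_pos (by omega), max_eq_right (by omega)]
      rw [hb]
    · have hnot : x ∉ T ++ [y] := by
        intro hmem
        have hyx : y ≤ x := hx_ge y (by simp)
        have hxy2 : x ≤ y := by
          rcases List.mem_append.mp hmem with h | h
          · exact (List.pairwise_append.mp hsub).2.2 x h y (by simp)
          · simp at h; omega
        exact hxy (by omega)
      have hxT : x ∉ T := fun h => hnot (List.mem_append_left _ h)
      have hyx2 : ¬ x = y := fun h => hxy h.symm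
      have hcnt : ((T ++ [y]) ++ [x]).count x = 1 := by
        have h1 : T.count x = 0 := List.count_eq_zero_of_not_mem hxT
        have h2 : List.count x [y] = 0 := by rw [List.count_eq_zero]; simp [hyx2]
        have h3 : List.count x [x] = 1 := List.count_singleton_self
        rw [List.count_append, List.count_append, h1, h2, h3]
      rw [List.foldl_cons, List.foldl_nil, pvStep_eq, if_neg (show ¬(some y = some x) from by simp [hxy])]
      conv_rhs => rw [pvMx_append, hcnt]
      push_cast
      have hb : (if (1 : Int) > pvMx (T ++ [y]) then (1 : Int) else pvMx (T ++ [y]))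
          = max (pvMx (T ++ [y])) 1 := by
        rcases le_or_gt (1 : Int) (pvMx (T ++ [y])) with h | h
        · rw [if_neg (by omega), max_eq_left (by omega)]
        · rw [if_pos (by omega), max_eq_right (by omega)]
      rw [hb]

lemma pv_scan_top (S : List Int) (hs : S.Pairwise (· ≤ ·)) :
    (S.foldl pvStep (0, 0, none)).1 = pvMx S := by
  rcases List.eq_nil_or_concat S with rfl | ⟨T, x, rfl⟩
  · simp [pvMx]
  · rw [List.concat_eq_append] at hs ⊢
    rw [pv_scan_sorted T x hs]

-- A's three loops, over abstract rng/f/s, compute max-of-counts of the flattened list.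
lemma pv_A_general (rng : List Int) (f s : Int → Int) :
    (pvD1 rng f s).keys.foldl
        (fun ans key => if ans < (pvD1 rng f s).getD key 0 then (pvD1 rng f s).getD key 0 else ans) 0
      = ((PySem.Set.ofList (rng.flatMap (fun i => [f i, s i]))).map
          (fun k => (((rng.flatMap (fun i => [f i, s i])).count k : Int)))).foldl max 0 := by
  have h1 : pvD1 rng f s =
      (rng.flatMap (fun i => [f i, s i])).foldl
        (fun (d : PySem.Dict Int Int) x => d.insert x (d.getD x 0 + 1))
        ((rng.flatMap (fun i => [f i, s i])).foldl
          (fun (d : PySem.Dict Int Int) x => d.insert x 0) PySem.Dict.empty) := by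
    unfold pvD1
    rw [pv_foldl_pair rng f s (fun (d : PySem.Dict Int Int) x => d.insert x 0) PySem.Dict.empty,
        pv_foldl_pair]
  set L := rng.flatMap (fun i => [f i, s i]) with hL
  have hzero : ∀ v : Int,
      (L.foldl (fun (d : PySem.Dict Int Int) x => d.insert x 0) PySem.Dict.empty).getD v 0 = 0 := by
    intro v
    have key : ∀ (l : List Int) (d : PySem.Dict Int Int), (∀ w : Int, d.getD w 0 = 0) →
        ∀ w : Int, (l.foldl (fun (d : PySem.Dict Int Int) x => d.insert x 0) d).getD w 0 = 0 := by
      intro l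
      induction l with
      | nil => intro d hd w; simpa using hd w
      | cons a t ih =>
        intro d hd w
        simp only [List.foldl_cons]
        exact ih _ (fun w => by rw [PySem.Dict.getD_insert]; split <;> simp [hd]) w
    exact key L PySem.Dict.empty (fun w => by simp) v
  have hcount : ∀ v : Int, (pvD1 rng f s).getD v 0 = (L.count v : Int) := by
    intro v
    rw [h1, PySem.Dict.getD_foldl_insert_add_one, hzero]
    simp
  have hkeys : (pvD1 rng f s).keys = PySem.Set.ofList L := by
    have hk0 : (L.foldl (fun (d : PySem.Dict Int Int) x => d.insert x 0) PySem.Dict.empty).keys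
        = PySem.Set.ofList L := by
      rw [PySem.Dict.keys_foldl_insert]
      simp [PySem.Set.update, PySem.Set.ofList_eq_foldl, PySem.Dict.keys_empty]
    have hupd : ∀ (xs : List Int) (t : PySem.Set Int), (∀ x ∈ xs, x ∈ t) →
        PySem.Set.update t xs = t := by
      intro xs
      induction xs with
      | nil => intro t _; rfl
      | cons a u ih =>
        intro t hmem
        have ha : PySem.Set.add t a = t := PySem.Set.add_of_mem (hmem a (by simp))
        simp only [PySem.Set.update, List.foldl_cons, ha]
        exact ih t (fun x hx => hmem x (by simp [hx]))
    rw [h1, PySem.Dict.keys_foldl_insert, hk0]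
    exact hupd L _ (fun x hx => (PySem.Set.mem_ofList L x).mpr hx)
  rw [show (fun (ans : Int) (key : Int) =>
        if ans < (pvD1 rng f s).getD key 0 then (pvD1 rng f s).getD key 0 else ans)
      = fun ans key => max ans ((L.count key : Int)) from ?_]
  · rw [hkeys, ← List.foldl_map]
  · funext ans key
    rw [hcount key]
    rcases lt_or_ge ans ((L.count key : Int)) with h | h
    · rw [if_pos h, max_eq_right (by omega)]
    · rw [if_neg (by omega), max_eq_left h]

lemma pv_A_eq (first second : List Int) :
    bestInvitation first second =
      ((PySem.Set.ofList (pvL first second)).map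
        (fun k => (((pvL first second).count k : Int)))).foldl max 0 := by
  have h : bestInvitation first second =
      (pvD1 (PySem.List.pyRange 0 (first.length : Int) 1)
          (fun i => PySem.List.pyGetD first i 0) (fun i => PySem.List.pyGetD second i 0)).keys.foldl
        (fun ans key =>
          if ans < (pvD1 (PySem.List.pyRange 0 (first.length : Int) 1)
              (fun i => PySem.List.pyGetD first i 0) (fun i => PySem.List.pyGetD second i 0)).getD key 0
          then (pvD1 (PySem.List.pyRange 0 (first.length : Int) 1)
              (fun i => PySem.List.pyGetD first i 0) (fun i => PySem.List.pyGetD second i 0)).getD key 0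
          else ans) 0 := rfl
  rw [h, pv_A_general]
  rfl

lemma pv_B_eq (first second : List Int) :
    bestInvitation_alt first second =
      pvMx (PySem.List.sorted (pvL first second) (fun x => x) false) := by
  have hvals : (PySem.List.pyRange 0 (first.length : Int) 1).foldl
      (fun vals i => (vals ++ [PySem.List.pyGetD first i 0]) ++ [PySem.List.pyGetD second i 0]) []
      = pvL first second := by
    have hb : (fun (vals : List Int) (i : Int) =>
          (vals ++ [PySem.List.pyGetD first i 0]) ++ [PySem.List.pyGetD second i 0])
        = fun vals i => vals ++ [PySem.List.pyGetD first i 0, PySem.List.pyGetD second i 0] := by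
      funext vals i; simp
    rw [hb, PySem.List.foldl_append_eq_flatMap]
    simp [pvL]
  have h : bestInvitation_alt first second =
      ((PySem.List.sorted ((PySem.List.pyRange 0 (first.length : Int) 1).foldl
          (fun vals i => (vals ++ [PySem.List.pyGetD first i 0]) ++ [PySem.List.pyGetD second i 0]) [])
        (fun x => x) false).foldl pvStep (0, 0, none)).1 := rfl
  rw [h, hvals]
  exact pv_scan_top _ (by
    have := PySem.List.sorted_pairwise (xs := pvL first second) (key := fun x => x)
    simpa using this)

-- ===== VERDICT (by name: the statement is the Claim_ definition above) =====
theorem bestInvitation_spec : Claim_equal_bestInvitation := by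
  intro first second _ _
  unfold Spec_bestInvitation
  rw [pv_A_eq, pv_B_eq]
  have hperm : (PySem.List.sorted (pvL first second) (fun x => x) false).Perm (pvL first second) :=
    PySem.List.sorted_perm _ _ _
  unfold pvMx
  apply pv_foldl_max_eq
  intro v
  constructor
  · intro hv
    rcases List.mem_map.mp hv with ⟨k, hk, hkeq⟩
    exact List.mem_map.mpr ⟨k, hperm.mem_iff.mpr ((PySem.Set.mem_ofList _ k).mp hk),
      by rw [← hkeq, hperm.count_eq]⟩
  · intro hv
    rcases List.mem_map.mp hv with ⟨k, hk, hkeq⟩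
    exact List.mem_map.mpr ⟨k, (PySem.Set.mem_ofList _ k).mpr (hperm.mem_iff.mp hk),
      by rw [← hkeq, hperm.count_eq]⟩
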